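-- pv_equiv track=rewrite | github.com/maternity/ak8s | ak8s/nestedns.py | _prefixes_of
-- ===== SOURCE A (Python) =====
-- def _prefixes_of(k):
--     '''Generate namespace prefixes of `k`.
--
--     >>> list(_prefixes_of('foo.bar.quux'))
--     ['foo', 'foo.bar']
--     '''
--
--     i = -1
--     while True:
--         try:
--             i = k.index('.', i+1)
--         except ValueError:
--             return
--         yield k[:i]
-- ===== SOURCE B (Python) =====
-- def _prefixes_of(k):
--     '''Generate namespace prefixes of `k` by splitting once and rebuilding
--     cumulative prefixes, instead of repeated str.index scans.'''
--     parts = k.split('.')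
--     prefix = parts[0]
--     for part in parts[1:]:
--         yield prefix
--         prefix = prefix + '.' + part
-- ===== Notes on version B (the rewrite author's own statement) =====
-- stated objective: simpler
-- what changed: B splits k on the dot separator once and rebuilds each cumulative prefix with a running accumulator, instead of A's repeated str.index scans with slicing of the original string.
import Mathlib
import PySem

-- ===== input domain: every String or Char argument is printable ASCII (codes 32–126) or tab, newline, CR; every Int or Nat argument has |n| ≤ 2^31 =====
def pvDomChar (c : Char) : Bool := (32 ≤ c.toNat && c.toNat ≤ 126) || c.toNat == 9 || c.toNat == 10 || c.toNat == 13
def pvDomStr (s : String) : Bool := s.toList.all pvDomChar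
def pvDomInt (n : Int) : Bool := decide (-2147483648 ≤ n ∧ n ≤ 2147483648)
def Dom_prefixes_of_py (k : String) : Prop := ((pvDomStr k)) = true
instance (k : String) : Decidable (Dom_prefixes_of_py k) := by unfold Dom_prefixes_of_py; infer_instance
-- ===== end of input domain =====

-- B replaces A's repeated str.index scan-and-slice with one split on the dot followed by an
-- accumulator that rebuilds each cumulative prefix (objective: simpler). Same return values.

-- ===== PORT A =====
-- A scans k for the next '.' from position i+1 and yields the slice k[:i] before it;
-- ported as a forward scan carrying the prefix seen so far (= k[:position]) and the rest.
def prefixesOfGoA (pre : List Char) : List Char → List String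
  | [] => []
  | c :: cs =>
    if c = '.' then String.mk pre :: prefixesOfGoA (pre ++ [c]) cs
    else prefixesOfGoA (pre ++ [c]) cs

def prefixes_of_py (k : String) : List String :=
  prefixesOfGoA [] k.toList

-- ===== PORT B =====
-- parts = k.split('.')  (single-char separator: Lean's List.splitOn is exact here);
-- then fold over parts[1:], yielding the running prefix and extending it with '.' + part.
def prefixesOfGoB (prefix' : List Char) : List (List Char) → List String
  | [] => []
  | p :: ps => String.mk prefix' :: prefixesOfGoB (prefix' ++ '.' :: p) ps

def prefixes_of_py_alt (k : String) : List String :=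
  match k.toList.splitOn '.' with
  | [] => []          -- unreachable: split never returns an empty list
  | p0 :: rest => prefixesOfGoB p0 rest

-- ===== PRECONDITION & SPEC =====
def Spec_prefixes_of_py (k : String) (out : List String) : Prop := out = prefixes_of_py_alt k
instance (k : String) (out : List String) : Decidable (Spec_prefixes_of_py k out) := by unfold Spec_prefixes_of_py; infer_instance

-- ===== CLAIM (what is proved, stated in full; the proofs are below) =====
def Claim_equal_prefixes_of_py : Prop := ∀ (k : String), Dom_prefixes_of_py k → Spec_prefixes_of_py k (prefixes_of_py k)

-- ===== LEMMAS AND PROOFS =====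

theorem prefixesOf_goA_eq_goB (cs : List Char) : ∀ (pre : List Char),
    prefixesOfGoA pre cs =
      match cs.splitOn '.' with
      | [] => []
      | p0 :: rest => prefixesOfGoB (pre ++ p0) rest := by
  induction cs with
  | nil =>
    intro pre
    simp [prefixesOfGoA, List.splitOn, List.splitOnP_nil, prefixesOfGoB]
  | cons c cs ih =>
    intro pre
    have hsplit : (c :: cs).splitOn '.' = List.splitOnP (· == '.') (c :: cs) := rfl
    have hcs : cs.splitOn '.' = List.splitOnP (· == '.') cs := rfl
    obtain ⟨q0, qs, hq⟩ : ∃ q0 qs, List.splitOnP (· == '.') cs = q0 :: qs := by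
      cases h : List.splitOnP (· == '.') cs with
      | nil => exact absurd h (List.splitOnP_ne_nil _ cs)
      | cons a l => exact ⟨a, l, rfl⟩
    by_cases hc : c = '.'
    · subst hc
      rw [hsplit, List.splitOnP_cons]
      simp only [BEq.rfl, if_true]
      simp only [prefixesOfGoA, ]
      rw [hq, ih (pre ++ ['.']), hcs, hq]
      simp [prefixesOfGoB]
    · rw [hsplit, List.splitOnP_cons]
      have hbeq : (c == '.') = false := by simp [hc]
      rw [hbeq]
      simp only [hq, List.modifyHead]
      simp only [prefixesOfGoA, if_neg hc]
      rw [ih (pre ++ [c]), hcs, hq]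
      simp

-- ===== VERDICT (by name: the statement is the Claim_ definition above) =====
theorem prefixes_of_py_spec : Claim_equal_prefixes_of_py := by
  intro k _
  unfold Spec_prefixes_of_py prefixes_of_py prefixes_of_py_alt
  rw [prefixesOf_goA_eq_goB]
  cases h : k.toList.splitOn '.' with
  | nil => exact absurd h (List.splitOnP_ne_nil _ _)
  | cons p0 rest => simp
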